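-- pv_equiv track=rewrite | github.com/dn6049949/library | math/BostanMori.py | mul_odd
-- ===== SOURCE A (Python) =====
-- def mul_odd(p, q):
--     res = [0]*((len(p)+len(q))>>1)
--     for i, pi in enumerate(p):
--         for j, qj in enumerate(q):
--             k = i+j
--             if k&1:
--                 res[k>>1] += pi*qj
--     return res
-- ===== SOURCE B (Python) =====
-- def mul_odd(p, q):
--     m = len(q)
--     out = []
--     for t in range((len(p) + m) >> 1):
--         k = 2 * t + 1
--         c = 0
--         for i, pi in enumerate(p):
--             if 0 <= k - i < m:
--                 c += pi * q[k - i]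
--         out.append(c)
--     return out
-- ===== Notes on version B (the rewrite author's own statement) =====
-- stated objective: alternative
-- what changed: A scatters each product p[i]*q[j] into a mutable result array at odd indices; B computes each output coefficient directly as a gather sum c_{2t+1} = sum_i p[i]*q[2t+1-i], appending coefficients in order with no index arithmetic into a pre-allocated array.
import Mathlib
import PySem

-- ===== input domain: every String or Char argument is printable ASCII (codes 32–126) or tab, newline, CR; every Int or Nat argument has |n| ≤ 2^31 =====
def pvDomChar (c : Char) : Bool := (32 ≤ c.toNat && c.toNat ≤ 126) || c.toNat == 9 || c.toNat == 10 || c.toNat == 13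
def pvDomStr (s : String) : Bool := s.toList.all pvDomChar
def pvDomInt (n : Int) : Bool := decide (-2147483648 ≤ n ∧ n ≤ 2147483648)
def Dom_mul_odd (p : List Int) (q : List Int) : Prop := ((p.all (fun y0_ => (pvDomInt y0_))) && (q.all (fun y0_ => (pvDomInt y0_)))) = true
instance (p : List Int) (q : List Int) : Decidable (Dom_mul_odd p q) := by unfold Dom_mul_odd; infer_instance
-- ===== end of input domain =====

-- B replaces A's scatter of each product p[i]*q[j] into a mutable result array by a direct
-- per-coefficient gather sum c_{2t+1} = Σ_i p[i]*q[2t+1-i]; same cost, alternative decomposition.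

-- ===== PORT A =====
-- res[k>>1] += … : the index k>>1 is always in range when k is odd (k ≤ len(p)+len(q)-2),
-- so the total pySetD/pyGetD forms are exact here.
def mul_odd (p : List Int) (q : List Int) : List Int :=
  let res : List Int := List.replicate (((PySem.List.len p + PySem.List.len q) >>> 1).toNat) 0
  (PySem.List.enumerate p 0).foldl (fun res ip =>
    (PySem.List.enumerate q 0).foldl (fun res jq =>
      let k := ip.1 + jq.1
      if PySem.Int.band k 1 = 1 then
        PySem.List.pySetD res (k >>> 1) (PySem.List.pyGetD res (k >>> 1) 0 + ip.2 * jq.2)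
      else res) res) res

-- ===== PORT B =====
-- q[k-i] is only read under the guard 0 ≤ k-i < len(q), so pyGetD is exact.
def mul_odd_alt (p : List Int) (q : List Int) : List Int :=
  let m := PySem.List.len q
  (PySem.List.pyRange 0 ((PySem.List.len p + m) >>> 1) 1).map (fun t =>
    let k := 2 * t + 1
    (PySem.List.enumerate p 0).foldl (fun c ip =>
      if 0 ≤ k - ip.1 ∧ k - ip.1 < m then c + ip.2 * PySem.List.pyGetD q (k - ip.1) 0 else c) 0)

-- ===== PRECONDITION & SPEC =====
def Spec_mul_odd (p : List Int) (q : List Int) (out : List Int) : Prop := out = mul_odd_alt p q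
instance (p : List Int) (q : List Int) (out : List Int) : Decidable (Spec_mul_odd p q out) := by unfold Spec_mul_odd; infer_instance

-- ===== CLAIM (what is proved, stated in full; the proofs are below) =====
def Claim_equal_mul_odd : Prop := ∀ (p : List Int) (q : List Int), Dom_mul_odd p q → Spec_mul_odd p q (mul_odd p q)

-- ===== LEMMAS AND PROOFS =====

-- Nat-level reformulations of the two loop bodies, and the per-row sums they produce.
def stepA (q : List Int) (pi : Int) (i : Nat) (r : List Int) (j : Nat) : List Int :=
  if (i + j) % 2 = 1 then r.set ((i + j) / 2) (r.getD ((i + j) / 2) 0 + pi * q.getD j 0) else r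

def rowA (q : List Int) (pi : Int) (i t : Nat) : Int :=
  ((List.range q.length).map (fun j => if i + j = 2 * t + 1 then pi * q.getD j 0 else 0)).sum

def rowB (q : List Int) (pi : Int) (i t : Nat) : Int :=
  if i ≤ 2 * t + 1 ∧ 2 * t + 1 - i < q.length then pi * q.getD (2 * t + 1 - i) 0 else 0

lemma shift1 (c : Nat) : ((c : Int)) >>> (1 : Int) = ((c / 2 : Nat) : Int) := by
  have h := Int.shiftRight_natCast c 1
  norm_num [Nat.shiftRight_succ] at h
  exact_mod_cast h

lemma band1 (c : Nat) : PySem.Int.band (c : Int) 1 = ((c % 2 : Nat) : Int) := by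
  simpa [Nat.and_one_is_mod] using PySem.Int.band_natCast c 1

lemma castLen (p q : List Int) :
    ((p.length : Int) + (q.length : Int)) >>> (1 : Int) = (((p.length + q.length) / 2 : Nat) : Int) := by
  rw [← Nat.cast_add, shift1]

-- A's port, re-read over Nat indices.
lemma normA (p q : List Int) :
    mul_odd p q =
      (List.range p.length).foldl
        (fun r i => (List.range q.length).foldl (stepA q (p.getD i 0) i) r)
        (List.replicate ((p.length + q.length) / 2) 0) := by
  unfold mul_odd
  rw [PySem.List.enumerate_eq_map_pyRange (xs:=p) 0, PySem.List.enumerate_eq_map_pyRange (xs:=q) 0]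
  simp only [PySem.List.len_eq, PySem.List.pyRange_zero_natCast, List.map_map, List.foldl_map]
  rw [castLen]
  simp only [Int.toNat_natCast]
  congr 1
  funext r i
  congr 1
  funext r' j
  simp only [Function.comp, ← Nat.cast_add, band1, shift1, Nat.cast_eq_one,
    PySem.List.pySetD_natCast, PySem.List.pyGetD_natCast, stepA]

lemma foldlIfAdd {α : Type} (l : List α) (c : α → Prop) [DecidablePred c] (g : α → Int) (a : Int) :
    l.foldl (fun s x => if c x then s + g x else s) a
      = a + (l.map (fun x => if c x then g x else 0)).sum := by
  induction l generalizing a with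
  | nil => simp
  | cons x l ih => by_cases h : c x <;> simp [h, ih, add_assoc]

lemma termB (q : List Int) (pi : Int) (i t : Nat) :
    (if 0 ≤ 2*(t:Int)+1-(i:Int) ∧ 2*(t:Int)+1-(i:Int) < (q.length:Int)
      then pi * PySem.List.pyGetD q (2*(t:Int)+1-(i:Int)) 0 else 0) = rowB q pi i t := by
  unfold rowB
  by_cases h : i ≤ 2*t+1 ∧ 2*t+1-i < q.length
  · have hc : (2*(t:Int)+1-(i:Int)) = ((2*t+1-i : Nat) : Int) := by omega
    rw [if_pos (by omega), if_pos h, hc, PySem.List.pyGetD_natCast]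
  · rw [if_neg (by omega), if_neg h]

-- B's port, re-read over Nat indices.
lemma normB (p q : List Int) :
    mul_odd_alt p q =
      (List.range ((p.length + q.length) / 2)).map
        (fun t => ((List.range p.length).map (fun i => rowB q (p.getD i 0) i t)).sum) := by
  unfold mul_odd_alt
  rw [PySem.List.enumerate_eq_map_pyRange (xs:=p) 0]
  simp only [PySem.List.len_eq]
  rw [castLen]
  simp only [PySem.List.pyRange_zero_natCast, List.map_map, List.foldl_map]
  apply List.map_congr_left
  intro t _
  simp only [Function.comp]
  rw [foldlIfAdd _ (fun (i:Nat) => 0 ≤ 2*(t:Int)+1-(i:Int) ∧ 2*(t:Int)+1-(i:Int) < (q.length:Int))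
      (fun (i:Nat) => (PySem.List.pyGetD p (i:Int) 0) * PySem.List.pyGetD q (2*(t:Int)+1-(i:Int)) 0)]
  simp only [PySem.List.pyGetD_natCast, zero_add]
  apply congrArg
  apply List.map_congr_left
  intro i _
  exact termB q (p.getD i 0) i t

lemma length_foldl_stepA (q : List Int) (pi : Int) (i : Nat) (l : List Nat) (r : List Int) :
    (l.foldl (stepA q pi i) r).length = r.length := by
  induction l generalizing r with
  | nil => rfl
  | cons j l ih => simp only [List.foldl_cons, ih, stepA]; split <;> simp

lemma length_foldl_outer (p q : List Int) (l : List Nat) (r : List Int) :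
    (l.foldl (fun r i => (List.range q.length).foldl (stepA q (p.getD i 0) i) r) r).length
      = r.length := by
  induction l generalizing r with
  | nil => rfl
  | cons i l ih => simp only [List.foldl_cons, ih, length_foldl_stepA]

lemma getD_stepA (q : List Int) (pi : Int) (i j t : Nat) (r : List Int) (ht : t < r.length) :
    (stepA q pi i r j).getD t 0
      = r.getD t 0 + (if i + j = 2 * t + 1 then pi * q.getD j 0 else 0) := by
  unfold stepA
  by_cases hodd : (i + j) % 2 = 1
  · by_cases heq : (i + j) / 2 = t
    · have hij : i + j = 2 * t + 1 := by omega
      have hh : (2 * t + 1) / 2 = t := by omega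
      simp [hij, hh, List.getD_eq_getElem?_getD, ht]
    · have hne : ¬ (i + j = 2 * t + 1) := by omega
      simp [hodd, hne, List.getD_eq_getElem?_getD, heq]
  · have hne : ¬ (i + j = 2 * t + 1) := by omega
    simp [hodd, hne]

lemma innerSum (q : List Int) (pi : Int) (i t : Nat) (l : List Nat) (r : List Int)
    (ht : t < r.length) :
    (l.foldl (stepA q pi i) r).getD t 0
      = r.getD t 0 + (l.map (fun j => if i + j = 2 * t + 1 then pi * q.getD j 0 else 0)).sum := by
  induction l generalizing r with
  | nil => simp
  | cons j l ih =>
      have hlen : t < (stepA q pi i r j).length := by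
        unfold stepA; split <;> simp [ht]
      simp only [List.foldl_cons, ih _ hlen, getD_stepA q pi i j t r ht, List.map_cons,
        List.sum_cons, add_assoc]

lemma outerSum (p q : List Int) (t : Nat) (l : List Nat) (r : List Int) (ht : t < r.length) :
    (l.foldl (fun r i => (List.range q.length).foldl (stepA q (p.getD i 0) i) r) r).getD t 0
      = r.getD t 0 + (l.map (fun i => rowA q (p.getD i 0) i t)).sum := by
  induction l generalizing r with
  | nil => simp
  | cons i l ih =>
      have hlen : t < ((List.range q.length).foldl (stepA q (p.getD i 0) i) r).length := by
        rw [length_foldl_stepA]; exact ht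
      simp only [List.foldl_cons, ih _ hlen,
        innerSum q (p.getD i 0) i t (List.range q.length) r ht, List.map_cons, List.sum_cons,
        add_assoc, rowA]

lemma pick (m c : Nat) (g : Nat → Int) :
    ((List.range m).map (fun j => if j = c then g j else 0)).sum = if c < m then g c else 0 := by
  induction m with
  | zero => simp
  | succ m ih =>
      rw [List.range_succ]
      simp only [List.map_append, List.sum_append, ih, List.map_cons, List.map_nil,
        List.sum_cons, List.sum_nil]
      by_cases h : c = m
      · subst h; simp
      · by_cases h2 : c < m
        · have h3 : c < m + 1 := by omega
          simp [h2, h3, Ne.symm h]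
        · have h3 : ¬ c < m + 1 := by omega
          simp [h2, h3, Ne.symm h]

lemma rowEq (q : List Int) (pi : Int) (i t : Nat) : rowA q pi i t = rowB q pi i t := by
  unfold rowA rowB
  by_cases hi : i ≤ 2 * t + 1
  · have hfun : (fun j => if i + j = 2 * t + 1 then pi * q.getD j 0 else 0)
        = (fun j => if j = 2 * t + 1 - i then pi * q.getD j 0 else 0) := by
      funext j; exact if_congr (by omega) rfl rfl
    rw [hfun, pick]
    simp [hi]
  · rw [if_neg (fun h => hi h.1)]
    refine List.sum_eq_zero ?_
    intro x hx
    simp only [List.mem_map] at hx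
    obtain ⟨j, _, rfl⟩ := hx
    exact if_neg (by omega)

-- ===== VERDICT (by name: the statement is the Claim_ definition above) =====
theorem mul_odd_spec : Claim_equal_mul_odd := by
  intro p q _
  show mul_odd p q = mul_odd_alt p q
  rw [normA, normB]
  apply List.ext_getElem
  · rw [length_foldl_outer]
    simp
  · intro t h1 h2
    have hlen : t < (List.replicate ((p.length + q.length) / 2) (0:Int)).length := by
      rw [length_foldl_outer] at h1; simpa using h1
    have hA := outerSum p q t (List.range p.length)
      (List.replicate ((p.length + q.length) / 2) 0) hlen
    have hL : t < (p.length + q.length) / 2 := by simpa using hlen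
    rw [← List.getD_eq_getElem _ 0 h1, ← List.getD_eq_getElem _ 0 h2, hA]
    simp [List.getD_eq_getElem?_getD, hL, rowEq]
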